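-- pv_equiv track=rewrite | github.com/einavrobyncohen/autonomous_networks_chatbot | app.py | _is_relevant_query
-- ===== SOURCE A (Python) =====
-- def _is_relevant_query(query: str) -> bool:
--     """Check if query is related to autonomous networks."""
--     relevant_terms = [
--         "autonomous", "network", "ai", "automation", "self-managing",
--         "self-healing", "intent-based", "zero-touch", "machine learning",
--         "orchestration", "sdn", "nfv", "telemetry", "analytics"
--     ]
--     query_lower = query.lower()
--     return any(term in query_lower for term in relevant_terms)
-- ===== SOURCE B (Python) =====
-- _TERMS = (
--     "autonomous", "network", "ai", "automation", "self-managing",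
--     "self-healing", "intent-based", "zero-touch", "machine learning",
--     "orchestration", "sdn", "nfv", "telemetry", "analytics",
-- )
--
-- def _is_relevant_query(query: str) -> bool:
--     """Position-major scan: walk the lowered query position by position and
--     test whether any term starts at the current position."""
--     q = query.lower()
--     for i in range(len(q) + 1):
--         if any(q.startswith(term, i) for term in _TERMS):
--             return True
--     return False
-- ===== Notes on version B (the rewrite author's own statement) =====
-- stated objective: alternative
-- what changed: A is term-major (for each term, a full substring search over the query); B is position-major (one walk over the lowered query's suffixes, testing at each position whether some term starts there), so no per-term substring search routine is used at all.
import Mathlib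
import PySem

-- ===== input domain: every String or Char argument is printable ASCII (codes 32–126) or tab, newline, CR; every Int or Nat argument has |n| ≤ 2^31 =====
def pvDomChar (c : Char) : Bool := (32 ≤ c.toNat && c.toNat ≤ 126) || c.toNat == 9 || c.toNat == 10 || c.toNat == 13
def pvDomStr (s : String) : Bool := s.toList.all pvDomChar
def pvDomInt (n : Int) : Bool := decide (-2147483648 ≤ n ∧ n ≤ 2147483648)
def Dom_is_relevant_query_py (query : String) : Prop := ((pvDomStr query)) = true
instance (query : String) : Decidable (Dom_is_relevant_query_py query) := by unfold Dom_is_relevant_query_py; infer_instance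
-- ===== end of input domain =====

-- B replaces A's term-major 'any(term in query_lower)' with a position-major suffix
-- scan testing whether some term starts at each position (objective: alternative).

-- ===== PORT A =====
def pvRelevantTerms : List String :=
  ["autonomous", "network", "ai", "automation", "self-managing",
   "self-healing", "intent-based", "zero-touch", "machine learning",
   "orchestration", "sdn", "nfv", "telemetry", "analytics"]

def is_relevant_query_py (query : String) : Bool :=
  let query_lower := PySem.Str.lower query
  pvRelevantTerms.any (fun term => PySem.Str.isIn term query_lower)

-- ===== PORT B =====
def pvAltTerms : List (List Char) :=
  ["autonomous".toList, "network".toList, "ai".toList, "automation".toList,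
   "self-managing".toList, "self-healing".toList, "intent-based".toList,
   "zero-touch".toList, "machine learning".toList, "orchestration".toList,
   "sdn".toList, "nfv".toList, "telemetry".toList, "analytics".toList]

-- Source B's loop over positions i = 0..len(q): q.startswith(term, i) is exactly "term is a
-- prefix of the i-th suffix", so the loop is recursion over the suffixes of the char list
def pvAltScan : List Char → Bool
  | [] => pvAltTerms.any (fun t => PySem.Chars.startswith [] t)
  | c :: rest =>
      pvAltTerms.any (fun t => PySem.Chars.startswith (c :: rest) t) || pvAltScan rest

def is_relevant_query_py_alt (query : String) : Bool :=
  pvAltScan (PySem.Str.lower query).toList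

-- ===== PRECONDITION & SPEC =====
def Spec_is_relevant_query_py (query : String) (out : Bool) : Prop := out = is_relevant_query_py_alt query
instance (query : String) (out : Bool) : Decidable (Spec_is_relevant_query_py query out) := by unfold Spec_is_relevant_query_py; infer_instance

-- ===== CLAIM (what is proved, stated in full; the proofs are below) =====
def Claim_equal_is_relevant_query_py : Prop := ∀ (query : String), Dom_is_relevant_query_py query → Spec_is_relevant_query_py query (is_relevant_query_py query)

-- ===== LEMMAS AND PROOFS =====

-- The suffix scan finds a term iff some term is an infix of the scanned list.
theorem pvAltScan_iff (l : List Char) :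
    pvAltScan l = true ↔ ∃ t ∈ pvAltTerms, t <:+: l := by
  induction l with
  | nil =>
      simp [pvAltScan, PySem.Chars.startswith_iff]
  | cons c rest ih =>
      simp only [pvAltScan, Bool.or_eq_true, List.any_eq_true,
        PySem.Chars.startswith_iff, ih, List.infix_cons_iff]
      constructor
      · rintro (⟨t, ht, hp⟩ | ⟨t, ht, hi⟩)
        · exact ⟨t, ht, Or.inl hp⟩
        · exact ⟨t, ht, Or.inr hi⟩
      · rintro ⟨t, ht, hp | hi⟩
        · exact Or.inl ⟨t, ht, hp⟩
        · exact Or.inr ⟨t, ht, hi⟩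

-- ===== VERDICT (by name: the statement is the Claim_ definition above) =====
theorem is_relevant_query_py_spec : Claim_equal_is_relevant_query_py := by
  intro query _
  unfold Spec_is_relevant_query_py is_relevant_query_py is_relevant_query_py_alt
  rw [Bool.eq_iff_iff, pvAltScan_iff]
  simp only [List.any_eq_true, PySem.Str.isIn_iff_infix]
  simp [pvRelevantTerms, pvAltTerms]
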